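-- pv_equiv track=rewrite | github.com/Centralmatrix3/Scripts | Source/Build.py | rules_order
-- ===== SOURCE A (Python) =====
-- def rules_order(lines, unknown_rule=False):
--     order_type = [
--         "DOMAIN", "DOMAIN-SUFFIX", "DOMAIN-KEYWORD", "DOMAIN-WILDCARD",
--         "IP-CIDR", "IP-CIDR6", "IP-ASN", "GEOIP"
--     ]
--     order_key = lambda line: line.partition(",")[2]
--     rules_all = []
--     rules_map = {rule: index for index, rule in enumerate(order_type)}
--     for line in lines:
--         type_key = line.split(",", 1)[0]
--         type_index = rules_map.get(type_key, len(order_type))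
--         rules_all.append((type_index, line))
--     rules_all.sort(key=lambda x: (x[0], order_key(x[1])))
--     rules_seen = set()
--     for type_index, rule in rules_all:
--         rule_lower = rule.lower()
--         if rule_lower in rules_seen:
--             continue
--         rules_seen.add(rule_lower)
--         if type_index == len(order_type) and not unknown_rule:
--             continue
--         yield rule
-- ===== SOURCE B (Python) =====
-- def rules_order(lines, unknown_rule=False):
--     order_type = [
--         "DOMAIN", "DOMAIN-SUFFIX", "DOMAIN-KEYWORD", "DOMAIN-WILDCARD",
--         "IP-CIDR", "IP-CIDR6", "IP-ASN", "GEOIP"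
--     ]
--     rules_map = {rule: index for index, rule in enumerate(order_type)}
--
--     def type_index(line):
--         return rules_map.get(line.split(",", 1)[0], len(order_type))
--
--     def suffix_key(line):
--         return line.partition(",")[2]
--
--     # Bucket by type index, sort each bucket by its comma-suffix, concatenate.
--     ordered = []
--     for index in range(len(order_type) + 1):
--         bucket = [line for line in lines if type_index(line) == index]
--         bucket.sort(key=suffix_key)
--         ordered += bucket
--
--     # Case-insensitive dedup (after ordering), dropping unknown types unless asked.
--     rules_seen = set()
--     for rule in ordered:
--         rule_lower = rule.lower()
--         if rule_lower in rules_seen: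
--             continue
--         rules_seen.add(rule_lower)
--         if type_index(rule) == len(order_type) and not unknown_rule:
--             continue
--         yield rule
-- ===== Notes on version B (the rewrite author's own statement) =====
-- stated objective: alternative
-- what changed: Instead of tagging every line with its type index and doing one global stable sort on the (type_index, suffix) tuple key, B partitions the lines into per-type buckets, sorts each bucket only by its comma-suffix, and concatenates the buckets in type order; the case-insensitive dedup and unknown-type filter then walk that concatenation.
import Mathlib
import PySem

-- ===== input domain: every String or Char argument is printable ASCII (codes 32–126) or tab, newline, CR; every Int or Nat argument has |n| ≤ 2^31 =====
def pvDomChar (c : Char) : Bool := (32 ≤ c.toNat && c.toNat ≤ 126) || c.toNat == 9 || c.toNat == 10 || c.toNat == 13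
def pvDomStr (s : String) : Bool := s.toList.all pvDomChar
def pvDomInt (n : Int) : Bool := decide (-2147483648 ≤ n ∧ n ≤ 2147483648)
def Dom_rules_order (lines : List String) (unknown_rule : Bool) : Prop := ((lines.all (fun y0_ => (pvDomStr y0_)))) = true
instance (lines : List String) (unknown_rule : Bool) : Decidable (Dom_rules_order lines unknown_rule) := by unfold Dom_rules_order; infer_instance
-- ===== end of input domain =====

-- B replaces A's single stable sort on the (type_index, comma-suffix) tuple key by per-type buckets
-- each sorted by suffix alone and concatenated in type order (objective: alternative decomposition).

-- ===== PORT A =====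
def pvOrderType : List String :=
  ["DOMAIN", "DOMAIN-SUFFIX", "DOMAIN-KEYWORD", "DOMAIN-WILDCARD",
   "IP-CIDR", "IP-CIDR6", "IP-ASN", "GEOIP"]

-- {rule: index for index, rule in enumerate(order_type)}
def pvRulesMap : PySem.Dict String Int :=
  (PySem.List.enumerate pvOrderType).foldl (fun d p => d.insert p.2 p.1) PySem.Dict.empty

-- line.partition(",")[2]; exact: partition and split(",", 1) cut at the same first comma
def pvOrderKeyA (line : String) : String :=
  ((PySem.Str.splitMax? line "," 1).getD [line]).getD 1 ""

-- rules_map.get(line.split(",", 1)[0], len(order_type))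
def pvTypeIndexA (line : String) : Int :=
  pvRulesMap.getD (((PySem.Str.splitMax? line "," 1).getD [line]).headD "") ((pvOrderType.length : Nat) : Int)

def rules_order (lines : List String) (unknown_rule : Bool) : List String :=
  let rules_all :=
    lines.foldl (fun acc line => acc ++ [(pvTypeIndexA line, line)]) ([] : List (Int × String))
  let sortedAll := PySem.List.sorted2 rules_all (fun x => x.1) (fun x => pvOrderKeyA x.2)
  (sortedAll.foldl
    (fun (st : PySem.Set String × List String) x =>
      let rule_lower := PySem.Str.lower x.2
      if PySem.Set.contains st.1 rule_lower then st
      else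
        (PySem.Set.add st.1 rule_lower,
         if x.1 == ((pvOrderType.length : Nat) : Int) && !unknown_rule then st.2
         else st.2 ++ [x.2]))
    (PySem.Set.empty, ([] : List String))).2

-- ===== PORT B =====
def pvOrderTypeB : List String :=
  ["DOMAIN", "DOMAIN-SUFFIX", "DOMAIN-KEYWORD", "DOMAIN-WILDCARD",
   "IP-CIDR", "IP-CIDR6", "IP-ASN", "GEOIP"]

def pvRulesMapB : PySem.Dict String Int :=
  (PySem.List.enumerate pvOrderTypeB).foldl (fun d p => d.insert p.2 p.1) PySem.Dict.empty

def pvTypeIndexB (line : String) : Int :=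
  pvRulesMapB.getD (((PySem.Str.splitMax? line "," 1).getD [line]).headD "") ((pvOrderTypeB.length : Nat) : Int)

def pvSuffixKeyB (line : String) : String :=
  ((PySem.Str.splitMax? line "," 1).getD [line]).getD 1 ""

def rules_order_alt (lines : List String) (unknown_rule : Bool) : List String :=
  -- bucket by type index, sort each bucket by suffix, concatenate
  let ordered :=
    (PySem.List.pyRange 0 (((pvOrderTypeB.length : Nat) : Int) + 1)).foldl
      (fun acc index =>
        acc ++ PySem.List.sorted (lines.filter (fun line => pvTypeIndexB line == index)) pvSuffixKeyB)
      ([] : List String)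
  -- case-insensitive dedup after ordering, dropping unknown types unless asked
  (ordered.foldl
    (fun (st : PySem.Set String × List String) rule =>
      let rule_lower := PySem.Str.lower rule
      if PySem.Set.contains st.1 rule_lower then st
      else
        (PySem.Set.add st.1 rule_lower,
         if pvTypeIndexB rule == ((pvOrderTypeB.length : Nat) : Int) && !unknown_rule then st.2
         else st.2 ++ [rule]))
    (PySem.Set.empty, ([] : List String))).2

-- ===== PRECONDITION & SPEC =====
def Spec_rules_order (lines : List String) (unknown_rule : Bool) (out : List String) : Prop := out = rules_order_alt lines unknown_rule
instance (lines : List String) (unknown_rule : Bool) (out : List String) : Decidable (Spec_rules_order lines unknown_rule out) := by unfold Spec_rules_order; infer_instance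

-- ===== CLAIM (what is proved, stated in full; the proofs are below) =====
def Claim_equal_rules_order : Prop := ∀ (lines : List String) (unknown_rule : Bool), Dom_rules_order lines unknown_rule → Spec_rules_order lines unknown_rule (rules_order lines unknown_rule)

-- ===== LEMMAS AND PROOFS =====

def pvPair (l : String) : Int × String := (pvTypeIndexA l, l)

def pvBucket (xs : List String) (i : Int) : List String :=
  PySem.List.sorted (xs.filter (fun l => pvTypeIndexA l == i)) pvOrderKeyA

lemma tiA_bound (l : String) : 0 ≤ pvTypeIndexA l ∧ pvTypeIndexA l ≤ 8 := by
  unfold pvTypeIndexA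
  generalize (((PySem.Str.splitMax? l "," 1).getD [l]).headD "") = k
  rw [PySem.Dict.getD_eq_get?_getD]
  have h : pvRulesMap = PySem.Dict.mk [("DOMAIN",0),("DOMAIN-SUFFIX",1),("DOMAIN-KEYWORD",2),("DOMAIN-WILDCARD",3),("IP-CIDR",4),("IP-CIDR6",5),("IP-ASN",6),("GEOIP",7)] := by rfl
  rw [h]
  simp only [PySem.Dict.get?_mk_cons]
  split_ifs <;> simp [PySem.Dict.get?, pvOrderType]

lemma insertBy_append_not_before {α : Type} (before : α → α → Bool) (x : α) (L R : List α)
    (h : ∀ y ∈ L, before x y = false) :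
    PySem.List.insertBy before x (L ++ R) = L ++ PySem.List.insertBy before x R := by
  induction L with
  | nil => rfl
  | cons y ys ih =>
    simp only [List.cons_append, PySem.List.insertBy, h y (by simp)]
    simp [ih (fun z hz => h z (by simp [hz]))]

lemma insertBy_append_head_before {α : Type} (before : α → α → Bool) (x : α) (M R : List α)
    (h : ∀ z, R.head? = some z → before x z = true) :
    PySem.List.insertBy before x (M ++ R) = PySem.List.insertBy before x M ++ R := by
  induction M with
  | nil =>
    cases R with
    | nil => rfl
    | cons z zs => simp [PySem.List.insertBy, h z rfl]
  | cons y ys ih =>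
    simp only [List.cons_append, PySem.List.insertBy]
    by_cases hb : before x y = true
    · simp [hb]
    · simp only [Bool.not_eq_true] at hb
      simp [hb, ih]

lemma insertBy_congr {α : Type} (b1 b2 : α → α → Bool) (x : α) (l : List α)
    (h : ∀ y ∈ l, b1 x y = b2 x y) :
    PySem.List.insertBy b1 x l = PySem.List.insertBy b2 x l := by
  induction l with
  | nil => rfl
  | cons y ys ih =>
    simp only [PySem.List.insertBy, h y (by simp)]
    by_cases hb : b2 x y = true
    · simp [hb]
    · simp only [Bool.not_eq_true] at hb
      simp [hb, ih (fun z hz => h z (by simp [hz]))]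

lemma insertBy_map_pair (x : String) (l : List String) :
    PySem.List.insertBy (fun a b => decide (pvOrderKeyA a.2 < pvOrderKeyA b.2)) (pvPair x) (l.map pvPair)
    = (PySem.List.insertBy (fun a b => decide (pvOrderKeyA a < pvOrderKeyA b)) x l).map pvPair := by
  induction l with
  | nil => rfl
  | cons y ys ih =>
    simp only [List.map_cons, PySem.List.insertBy, pvPair]
    split_ifs with h1
    · rfl
    · exact congrArg (List.cons (pvPair y)) ih

lemma sorted2_concat (L : List (Int × String)) (e : Int × String) :
    PySem.List.sorted2 (L ++ [e]) (fun p => p.1) (fun p => pvOrderKeyA p.2) =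
      PySem.List.insertBy
        (fun a b => decide (a.1 < b.1) || (!decide (b.1 < a.1) && decide (pvOrderKeyA a.2 < pvOrderKeyA b.2))) e
        (PySem.List.sorted2 L (fun p => p.1) (fun p => pvOrderKeyA p.2)) := by
  simp [PySem.List.sorted2, List.foldl_append]

lemma sorted_concat (L : List String) (e : String) :
    PySem.List.sorted (L ++ [e]) pvOrderKeyA =
      PySem.List.insertBy (fun a b => decide (pvOrderKeyA a < pvOrderKeyA b)) e
        (PySem.List.sorted L pvOrderKeyA) := by
  rw [PySem.List.sorted_eq_foldl_insertBy, List.foldl_append, ← PySem.List.sorted_eq_foldl_insertBy]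
  rfl

lemma mem_bucket_ti {xs : List String} {i : Int} {l : String} (h : l ∈ pvBucket xs i) :
    pvTypeIndexA l = i := by
  unfold pvBucket at h
  rw [PySem.List.mem_sorted] at h
  rw [List.mem_filter] at h
  exact beq_iff_eq.1 h.2

-- A's single stable sort on the tuple key equals B's bucket concatenation (mapped to A's pairs)
set_option maxHeartbeats 1000000 in
lemma pvDecomp (xs : List String) :
    PySem.List.sorted2 (xs.map pvPair) (fun p => p.1) (fun p => pvOrderKeyA p.2)
    = ((PySem.List.pyRange 0 9).flatMap (pvBucket xs)).map pvPair := by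
  induction xs using List.reverseRecOn with
  | nil =>
    have h : ∀ i ∈ PySem.List.pyRange 0 9, pvBucket [] i = [] := by
      intro i _; simp [pvBucket, PySem.List.sorted]
    simp [PySem.List.sorted2, List.flatMap_def, List.map_congr_left h]
  | append_singleton ys x ih =>
    obtain ⟨hj0, hj8⟩ := tiA_bound x
    rw [List.map_append, List.map_singleton, sorted2_concat, ih]
    have hbNe : ∀ i : Int, i ≠ pvTypeIndexA x → pvBucket (ys ++ [x]) i = pvBucket ys i := by
      intro i hi
      have hx : (pvTypeIndexA x == i) = false := by simp [Ne.symm hi]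
      simp [pvBucket, List.filter_append, hx]
    have hbEq : pvBucket (ys ++ [x]) (pvTypeIndexA x) =
        PySem.List.insertBy (fun a b => decide (pvOrderKeyA a < pvOrderKeyA b)) x
          (pvBucket ys (pvTypeIndexA x)) := by
      simp only [pvBucket, List.filter_append]
      simp [sorted_concat]
    have hsplit : PySem.List.pyRange 0 9 =
        PySem.List.pyRange 0 (pvTypeIndexA x) ++ pvTypeIndexA x :: PySem.List.pyRange (pvTypeIndexA x + 1) 9 := by
      rw [PySem.List.pyRange_one_append 0 (pvTypeIndexA x) 9 hj0 (by omega),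
          PySem.List.pyRange_one_cons (show pvTypeIndexA x < 9 by omega)]
    rw [hsplit]
    simp only [List.flatMap_append, List.flatMap_cons, List.map_append]
    have hlow : ∀ i ∈ PySem.List.pyRange 0 (pvTypeIndexA x), pvBucket (ys ++ [x]) i = pvBucket ys i := by
      intro i hi
      have := PySem.List.mem_pyRange_one.1 hi
      exact hbNe i (by omega)
    have hhigh : ∀ i ∈ PySem.List.pyRange (pvTypeIndexA x + 1) 9, pvBucket (ys ++ [x]) i = pvBucket ys i := by
      intro i hi
      have := PySem.List.mem_pyRange_one.1 hi
      exact hbNe i (by omega)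
    rw [show (PySem.List.pyRange 0 (pvTypeIndexA x)).flatMap (pvBucket (ys ++ [x]))
          = (PySem.List.pyRange 0 (pvTypeIndexA x)).flatMap (pvBucket ys) by
        simp only [List.flatMap_def]; rw [List.map_congr_left hlow]]
    rw [show (PySem.List.pyRange (pvTypeIndexA x + 1) 9).flatMap (pvBucket (ys ++ [x]))
          = (PySem.List.pyRange (pvTypeIndexA x + 1) 9).flatMap (pvBucket ys) by
        simp only [List.flatMap_def]; rw [List.map_congr_left hhigh]]
    rw [hbEq]
    have hmid : PySem.List.insertBy
          (fun a b => decide (a.1 < b.1) || (!decide (b.1 < a.1) && decide (pvOrderKeyA a.2 < pvOrderKeyA b.2)))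
          (pvPair x) ((pvBucket ys (pvTypeIndexA x)).map pvPair)
        = (PySem.List.insertBy (fun a b => decide (pvOrderKeyA a < pvOrderKeyA b)) x
            (pvBucket ys (pvTypeIndexA x))).map pvPair := by
      rw [insertBy_congr (b2 := fun a b => decide (pvOrderKeyA a.2 < pvOrderKeyA b.2))]
      · exact insertBy_map_pair x (pvBucket ys (pvTypeIndexA x))
      · intro y hy
        obtain ⟨l, hl, rfl⟩ := List.mem_map.1 hy
        have hti : pvTypeIndexA l = pvTypeIndexA x := mem_bucket_ti hl
        simp [pvPair, hti]
    rw [insertBy_append_not_before]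
    · rw [insertBy_append_head_before]
      · rw [hmid]
      · intro z hz
        obtain ⟨t, ht⟩ := List.head?_eq_some_iff.1 hz
        have hzR : z ∈ (List.flatMap (pvBucket ys) (PySem.List.pyRange (pvTypeIndexA x + 1) 9)).map pvPair := by
          rw [ht]; exact List.mem_cons_self
        obtain ⟨l, ⟨i, hi, hl⟩, rfl⟩ := by
          simpa only [List.mem_map, List.mem_flatMap] using hzR
        have hi' := PySem.List.mem_pyRange_one.1 hi
        have hti : pvTypeIndexA l = i := mem_bucket_ti hl
        have h1 : decide (pvTypeIndexA x < i) = true := by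
          rw [decide_eq_true_iff]; omega
        simp [pvPair, hti, h1]
    · intro y hy
      obtain ⟨l, ⟨i, hi, hl⟩, rfl⟩ := by
        simpa only [List.mem_map, List.mem_flatMap] using hy
      have hi' := PySem.List.mem_pyRange_one.1 hi
      have hti : pvTypeIndexA l = i := mem_bucket_ti hl
      have h1 : decide (pvTypeIndexA x < i) = false := by
        rw [decide_eq_false_iff_not]; omega
      have h2 : decide (i < pvTypeIndexA x) = true := by
        rw [decide_eq_true_iff]; omega
      simp [pvPair, hti, h1, h2]

-- ===== VERDICT (by name: the statement is the Claim_ definition above) =====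
set_option maxHeartbeats 1000000 in
theorem rules_order_spec : Claim_equal_rules_order := by
  intro lines u _
  unfold Spec_rules_order rules_order rules_order_alt
  dsimp only
  rw [PySem.List.foldl_append_singleton_eq_map (f := fun line => (pvTypeIndexA line, line))]
  rw [PySem.List.foldl_append_eq_flatMap]
  simp only [List.nil_append]
  rw [show List.map (fun line => (pvTypeIndexA line, line)) lines = List.map pvPair lines from rfl]
  rw [pvDecomp lines]
  rw [show ((pvOrderTypeB.length : Nat) : Int) + 1 = 9 from by norm_num [pvOrderTypeB]]
  rw [show (fun index => PySem.List.sorted (lines.filter (fun line => pvTypeIndexB line == index)) pvSuffixKeyB)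
        = pvBucket lines from rfl]
  rw [List.foldl_map]
  rfl
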